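-- pv_equiv track=rewrite | github.com/lq-ruan/Final-project | DressedByTheDay.py | generate_outfit
-- ===== SOURCE A (Python) =====
-- def generate_outfit(items):
--     outfit = []
--
--     # 1-item
--     for i in range(len(items)):
--         outfit.append([items[i]])
--
--     # 2-item combos
--     for i in range(len(items)):
--         for j in range(i + 1, len(items)):
--             outfit.append([items[i], items[j]])
--
--     # 3-item combos
--     for i in range(len(items)):
--         for j in range(i + 1, len(items)):
--             for k in range(j + 1, len(items)):
--                 outfit.append([items[i], items[j], items[k]])
--
--     return outfit
-- ===== SOURCE B (Python) =====
-- def generate_outfit(items):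
--     n = len(items)
--     level1 = [([items[i]], i) for i in range(n)]
--     level2 = [(c + [items[j]], j) for c, last in level1 for j in range(last + 1, n)]
--     level3 = [c + [x] for c, last in level2 for x in items[last + 1:]]
--     return [c for c, _ in level1] + [c for c, _ in level2] + level3
-- ===== Notes on version B (the rewrite author's own statement) =====
-- stated objective: alternative
-- what changed: Replaces the three independent 1/2/3-deep nested index loops by incremental level-wise construction: 1-item (combo, last-index) prefixes are extended to 2-item combos by greater indices and to 3-item combos by slicing off items past the last index, then the three levels are concatenated.
import Mathlib
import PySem

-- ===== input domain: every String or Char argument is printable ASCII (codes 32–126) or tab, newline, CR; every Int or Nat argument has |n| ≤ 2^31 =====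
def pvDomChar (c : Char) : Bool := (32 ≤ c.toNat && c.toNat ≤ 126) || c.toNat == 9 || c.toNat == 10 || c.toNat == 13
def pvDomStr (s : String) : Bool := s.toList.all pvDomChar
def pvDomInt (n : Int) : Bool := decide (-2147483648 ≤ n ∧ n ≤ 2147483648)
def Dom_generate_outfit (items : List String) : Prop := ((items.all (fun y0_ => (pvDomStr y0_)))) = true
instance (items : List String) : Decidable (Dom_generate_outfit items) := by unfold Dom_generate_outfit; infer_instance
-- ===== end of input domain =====

-- B replaces A's three independent nested index loops by level-wise extension of
-- (combo, last-index) prefixes; same values, alternative decomposition.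
-- ===== PORT A =====
def generate_outfit (items : List String) : List (List String) :=
  let n : Int := items.length
  let outfit : List (List String) := []
  let outfit := (PySem.List.pyRange 0 n 1).foldl
      (fun acc i => acc ++ [[PySem.List.pyGetD items i ""]]) outfit
  let outfit := (PySem.List.pyRange 0 n 1).foldl (fun acc i =>
      (PySem.List.pyRange (i + 1) n 1).foldl
        (fun acc j => acc ++ [[PySem.List.pyGetD items i "", PySem.List.pyGetD items j ""]]) acc) outfit
  let outfit := (PySem.List.pyRange 0 n 1).foldl (fun acc i =>
      (PySem.List.pyRange (i + 1) n 1).foldl (fun acc j =>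
        (PySem.List.pyRange (j + 1) n 1).foldl
          (fun acc k => acc ++ [[PySem.List.pyGetD items i "", PySem.List.pyGetD items j "",
                                 PySem.List.pyGetD items k ""]]) acc) acc) outfit
  outfit

-- ===== PORT B =====
def generate_outfit_alt (items : List String) : List (List String) :=
  let n : Int := items.length
  let level1 := (PySem.List.pyRange 0 n 1).map (fun i => ([PySem.List.pyGetD items i ""], i))
  let level2 := level1.flatMap (fun p =>
    (PySem.List.pyRange (p.2 + 1) n 1).map (fun j => (p.1 ++ [PySem.List.pyGetD items j ""], j)))
  let level3 := level2.flatMap (fun p =>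
    (PySem.List.slice items (some (p.2 + 1)) none).map (fun x => p.1 ++ [x]))
  level1.map (·.1) ++ level2.map (·.1) ++ level3

-- ===== PRECONDITION & SPEC =====
def Spec_generate_outfit (items : List String) (out : List (List String)) : Prop := out = generate_outfit_alt items
instance (items : List String) (out : List (List String)) : Decidable (Spec_generate_outfit items out) := by unfold Spec_generate_outfit; infer_instance

-- ===== CLAIM (what is proved, stated in full; the proofs are below) =====
def Claim_equal_generate_outfit : Prop := ∀ (items : List String), Dom_generate_outfit items → Spec_generate_outfit items (generate_outfit items)

-- ===== LEMMAS AND PROOFS =====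
-- items[a:] as a map over range(a, len(items)) of indexing, for 0 ≤ a
lemma pv_slice_map (items : List String) (a : Int) (h : 0 ≤ a) :
    PySem.List.slice items (some a) none
      = (PySem.List.pyRange a items.length 1).map (fun k => PySem.List.pyGetD items k "") := by
  lift a to ℕ using h
  rw [PySem.List.slice_from_natCast,
    PySem.List.map_pyGetD_pyRange' items "" (show (0 : Int) ≤ (a : Int) by omega)]
  simp

-- ===== VERDICT (by name: the statement is the Claim_ definition above) =====
theorem generate_outfit_spec : Claim_equal_generate_outfit := by
  intro items _
  unfold Spec_generate_outfit generate_outfit generate_outfit_alt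
  simp only [PySem.List.foldl_append_singleton_eq_map, PySem.List.foldl_append_eq_flatMap,
    List.nil_append, List.map_flatMap, List.flatMap_map, List.map_map, Function.comp_def,
    List.flatMap_assoc, List.cons_append, List.append_assoc]
  congr 2
  apply List.flatMap_congr
  intro i hi
  apply List.flatMap_congr
  intro j hj
  have h0i : 0 ≤ i := ((PySem.List.mem_pyRange_one).1 hi).1
  have hij : i + 1 ≤ j := ((PySem.List.mem_pyRange_one).1 hj).1
  rw [pv_slice_map items (j + 1) (by omega), List.map_map]
  simp [Function.comp_def]
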